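-- pv_equiv track=rewrite | github.com/proecheng/cad-spec-gen | tools/model_audit.py | _summary_quality_counts
-- ===== SOURCE A (Python) =====
-- from typing import Any
--
-- _QUALITY_ORDER = {"A": 5, "B": 4, "C": 3, "D": 2, "E": 1, "unknown": 0}
--
-- def _summary_quality_counts(part_summaries: list[dict[str, Any]]) -> dict[str, int]:
--     counts: dict[str, int] = {}
--     for item in part_summaries:
--         quality = str(item.get("geometry_quality") or "unknown")
--         counts[quality] = counts.get(quality, 0) + 1
--     return dict(
--         sorted(
--             counts.items(),
--             key=lambda item: (-_QUALITY_ORDER.get(item[0], -1), item[0]),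
--         )
--     )
-- ===== SOURCE B (Python) =====
-- _QUALITY_ORDER = {"A": 5, "B": 4, "C": 3, "D": 2, "E": 1, "unknown": 0}
--
-- def _summary_quality_counts(part_summaries):
--     qualities = [str(item.get("geometry_quality") or "unknown") for item in part_summaries]
--     counts = {}
--     for q in qualities:
--         counts[q] = counts.get(q, 0) + 1
--     out = {}
--     for k in _QUALITY_ORDER:  # keys listed in descending priority already
--         if k in counts:
--             out[k] = counts[k]
--     for k in sorted(k for k in counts if k not in _QUALITY_ORDER):
--         out[k] = counts[k]
--     return out
-- ===== Notes on version B (the rewrite author's own statement) =====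
-- stated objective: alternative
-- what changed: The ordered result is produced by table-driven emission (walk _QUALITY_ORDER's keys in their descending-priority order, then append the non-table qualities sorted alphabetically) instead of a comparison sort with a (-priority, name) tuple key.
import Mathlib
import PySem

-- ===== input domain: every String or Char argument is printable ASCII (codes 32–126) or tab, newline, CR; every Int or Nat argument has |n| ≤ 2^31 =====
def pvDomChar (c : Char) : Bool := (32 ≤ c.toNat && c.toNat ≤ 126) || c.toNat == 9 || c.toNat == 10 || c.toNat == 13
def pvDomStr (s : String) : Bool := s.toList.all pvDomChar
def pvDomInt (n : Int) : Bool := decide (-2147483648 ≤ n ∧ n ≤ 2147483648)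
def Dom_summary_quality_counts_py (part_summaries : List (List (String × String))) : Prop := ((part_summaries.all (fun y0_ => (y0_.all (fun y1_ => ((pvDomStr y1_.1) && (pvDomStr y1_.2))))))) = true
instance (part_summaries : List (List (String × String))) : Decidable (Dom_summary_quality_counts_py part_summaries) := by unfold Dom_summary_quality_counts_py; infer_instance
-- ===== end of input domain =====

-- B replaces A's comparison sort with a (-priority, name) tuple key by a table-driven emission
-- (priority table order first, remaining qualities alphabetically); same cost, different algorithm.

-- ===== PORT A =====
-- _QUALITY_ORDER
def pvQualityOrder : PySem.Dict String Int :=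
  PySem.Dict.mk [("A", 5), ("B", 4), ("C", 3), ("D", 2), ("E", 1), ("unknown", 0)]

-- quality = str(item.get("geometry_quality") or "unknown"); under the type convention the dict
-- values are strings, so str() is the identity and 'or' replaces a missing value or "" by "unknown"
def pvQuality (item : List (String × String)) : String :=
  match (PySem.Dict.mk item).get? "geometry_quality" with
  | none => "unknown"
  | some s => if s = "" then "unknown" else s

-- Python's tuple sort key (-_QUALITY_ORDER.get(q, -1), q) is ported with PySem.List.sorted2
-- (Python's lexicographic tuple comparison); the string component is compared on the char-list
-- side (exact: Python compares strings by code points). dict(sorted(...)) over pairs with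
-- distinct keys is that very list of pairs under the association-list convention.
def summary_quality_counts_py (part_summaries : List (List (String × String))) : List (String × Int) :=
  let counts : PySem.Dict String Int :=
    part_summaries.foldl
      (fun counts item =>
        let quality := pvQuality item
        counts.insert quality (counts.getD quality 0 + 1))
      PySem.Dict.empty
  PySem.List.sorted2 counts.items
    (fun it => -(pvQualityOrder.getD it.1 (-1))) (fun it => it.1.toList)

-- ===== PORT B =====
-- the keys of _QUALITY_ORDER, in insertion (= descending-priority) order
def pvTable : List String := ["A", "B", "C", "D", "E", "unknown"]

def summary_quality_counts_py_alt (part_summaries : List (List (String × String))) : List (String × Int) :=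
  let qualities := part_summaries.map pvQuality
  let counts : PySem.Dict String Int :=
    qualities.foldl (fun c q => c.insert q (c.getD q 0 + 1)) PySem.Dict.empty
  let out : List (String × Int) :=
    pvTable.foldl
      (fun out k => if counts.contains k then out ++ [(k, counts.getD k 0)] else out) []
  -- sorted(...) on strings: compared on the char-list side (exact on code points)
  (PySem.List.sorted (counts.keys.filter (fun k => !pvTable.contains k)) (fun k => k.toList)).foldl
    (fun out k => out ++ [(k, counts.getD k 0)]) out

-- ===== PRECONDITION & SPEC =====
def Spec_summary_quality_counts_py (part_summaries : List (List (String × String))) (out : List (String × Int)) : Prop := out = summary_quality_counts_py_alt part_summaries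
instance (part_summaries : List (List (String × String))) (out : List (String × Int)) : Decidable (Spec_summary_quality_counts_py part_summaries out) := by unfold Spec_summary_quality_counts_py; infer_instance

-- ===== CLAIM (what is proved, stated in full; the proofs are below) =====
def Claim_equal_summary_quality_counts_py : Prop := ∀ (part_summaries : List (List (String × String))), Dom_summary_quality_counts_py part_summaries → Spec_summary_quality_counts_py part_summaries (summary_quality_counts_py part_summaries)

-- ===== LEMMAS AND PROOFS =====

-- the sort key of A, on the underlying quality string
def pvKey (k : String) : Lex (Int × List Char) := toLex (-(pvQualityOrder.getD k (-1)), k.toList)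

-- sorted2 (Python's tuple key) is sorted with the corresponding lexicographic key
theorem pv_before_eq {α : Type} (k1 : α → Int) (k2 : α → List Char) (a b : α) :
    (decide (k1 a < k1 b) || (!decide (k1 b < k1 a) && decide (k2 a < k2 b)))
      = decide ((toLex (k1 a, k2 a) : Int ×ₗ List Char) < toLex (k1 b, k2 b)) := by
  rcases lt_trichotomy (k1 a) (k1 b) with h | h | h
  · simp [h, Prod.Lex.toLex_lt_toLex, asymm h]
  · simp [h, Prod.Lex.toLex_lt_toLex]
  · simp only [Prod.Lex.toLex_lt_toLex]
    have hA : decide (k1 a < k1 b) = false := decide_eq_false (asymm h)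
    have hB : decide (k1 b < k1 a) = true := decide_eq_true h
    have hC : decide (k1 a < k1 b ∨ k1 a = k1 b ∧ k2 a < k2 b) = false := by
      refine decide_eq_false ?_
      rintro (h1 | ⟨h1, -⟩)
      · exact absurd h1 (asymm h)
      · exact absurd h1 h.ne'
    rw [hA, hB, hC]
    rfl

theorem pv_sorted2_eq_sorted_lex {α : Type} (xs : List α) (k1 : α → Int) (k2 : α → List Char) :
    PySem.List.sorted2 xs k1 k2
      = PySem.List.sorted xs (fun x => (toLex (k1 x, k2 x) : Int ×ₗ List Char)) := by
  show List.foldl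
      (fun acc x => PySem.List.insertBy
        (fun a b => decide (k1 a < k1 b) || (!decide (k1 b < k1 a) && decide (k2 a < k2 b))) x acc)
      [] xs = _
  rw [PySem.List.sorted_eq_foldl_insertBy]
  congr 1
  funext acc x
  congr 1
  funext a b
  exact pv_before_eq k1 k2 a b

theorem pvOrd_of_not_mem_table {k : String} (h : k ∉ pvTable) :
    pvQualityOrder.getD k (-1) = -1 := by
  simp only [pvTable, List.mem_cons, List.not_mem_nil, or_false, not_or] at h
  obtain ⟨h1, h2, h3, h4, h5, h6⟩ := h
  simp [pvQualityOrder, PySem.Dict.getD_eq_get?_getD,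
    Ne.symm h1, Ne.symm h2, Ne.symm h3, Ne.symm h4, Ne.symm h5, Ne.symm h6, PySem.Dict.get?]

theorem pvOrd_nonneg_of_mem_table {k : String} (h : k ∈ pvTable) :
    0 ≤ pvQualityOrder.getD k (-1) := by
  fin_cases h <;> decide

theorem pvTable_pairwise : List.Pairwise (fun a b => pvKey a < pvKey b) pvTable := by decide

theorem pvKey_lt_of_table_extra {a b : String} (ha : a ∈ pvTable) (hb : b ∉ pvTable) :
    pvKey a < pvKey b := by
  apply Prod.Lex.toLex_lt_toLex.mpr
  left
  have h1 := pvOrd_nonneg_of_mem_table ha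
  have h2 := pvOrd_of_not_mem_table hb
  simp only [h2]
  omega

theorem pvKey_lt_of_extra_lt {a b : String} (ha : a ∉ pvTable) (hb : b ∉ pvTable)
    (hab : a.toList < b.toList) : pvKey a < pvKey b := by
  apply Prod.Lex.toLex_lt_toLex.mpr
  right
  have h1 := pvOrd_of_not_mem_table ha
  have h2 := pvOrd_of_not_mem_table hb
  simp [h1, h2, hab]

-- the whole equality, stated over the list of quality strings
theorem pv_main (qs : List String) :
    PySem.List.sorted (PySem.Dict.counter qs).items
      (fun it => (toLex (-(pvQualityOrder.getD it.1 (-1)), it.1.toList) : Int ×ₗ List Char))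
    = (PySem.List.sorted
          ((PySem.Dict.counter qs).keys.filter (fun k => !pvTable.contains k))
          (fun k => k.toList)).foldl
        (fun out k => out ++ [(k, (PySem.Dict.counter qs).getD k 0)])
        (pvTable.foldl
          (fun out k =>
            if (PySem.Dict.counter qs).contains k then out ++ [(k, (PySem.Dict.counter qs).getD k 0)]
            else out) []) := by
  rw [PySem.List.foldl_append_if, PySem.List.foldl_append_singleton_eq_map]
  have hfun : (PySem.Dict.counter qs).contains = qs.contains :=
    funext fun k => PySem.Dict.contains_counter qs k
  simp only [PySem.Dict.items_counter, PySem.Dict.keys_counter, PySem.Dict.getD_counter,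
    hfun, List.nil_append, ← List.map_append]
  set S := PySem.Set.ofList qs with hS
  set f : String → String × Int := fun k => (k, (qs.count k : Int)) with hf
  set T' := pvTable.filter qs.contains with hT'
  set E := PySem.List.sorted (S.filter (fun k => !pvTable.contains k)) (fun k => k.toList) with hE
  have hEmem : ∀ x, x ∈ E ↔ x ∈ qs ∧ x ∉ pvTable := by
    intro x
    rw [hE, PySem.List.mem_sorted, List.mem_filter]
    simp [hS, PySem.Set.mem_ofList]
  have hkeys : List.Pairwise (fun a b => pvKey a < pvKey b) (T' ++ E) := by
    rw [List.pairwise_append]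
    refine ⟨pvTable_pairwise.sublist List.filter_sublist, ?_, ?_⟩
    · have hnd : E.Nodup := by
        rw [hE]
        exact (PySem.List.sorted_perm _ _ _).nodup_iff.mpr
          ((PySem.Set.nodup_ofList qs).filter _)
      have hle : List.Pairwise (fun a b : String => a.toList ≤ b.toList) E := by
        rw [hE]
        have h1 : PySem.List.sorted (S.filter (fun k => !pvTable.contains k))
              (fun k : String => k.toList)
            = @PySem.List.sorted String (List Char) List.instLinearOrder.toLT
                LinearOrder.toDecidableLT
                (S.filter (fun k => !pvTable.contains k)) (fun k => k.toList) false := by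
          congr 1
        rw [h1]
        exact PySem.List.sorted_pairwise (S.filter (fun k => !pvTable.contains k))
          (fun k : String => k.toList)
      refine (hle.and hnd).imp_of_mem ?_
      intro a b ha hb hab
      refine pvKey_lt_of_extra_lt ((hEmem a).mp ha).2 ((hEmem b).mp hb).2 ?_
      exact lt_of_le_of_ne hab.1 (fun hc => hab.2 (String.toList_inj.mp hc))
    · intro a ha b hb
      exact pvKey_lt_of_table_extra (List.mem_of_mem_filter ha) ((hEmem b).mp hb).2
  have hnd1 : (T' ++ E).Nodup := by
    refine hkeys.imp ?_
    intro a b h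
    rintro rfl
    exact lt_irrefl _ h
  have hperm : ((T' ++ E).map f).Perm (S.map f) := by
    refine List.Perm.map f ?_
    refine (List.perm_ext_iff_of_nodup hnd1 (PySem.Set.nodup_ofList qs)).mpr ?_
    intro x
    rw [List.mem_append, hEmem x, hT', List.mem_filter]
    simp only [PySem.Set.mem_ofList, List.contains_iff_mem]
    by_cases hx : x ∈ pvTable <;> simp [hx]
  refine PySem.List.sorted_eq_of_perm_of_pairwise_lt _ _ _ hperm ?_
  rw [List.pairwise_map]
  refine hkeys.imp ?_
  intro a b h
  simpa [hf, pvKey] using h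

-- ===== VERDICT (by name: the statement is the Claim_ definition above) =====
theorem summary_quality_counts_py_spec : Claim_equal_summary_quality_counts_py := by
  intro ps _
  unfold Spec_summary_quality_counts_py summary_quality_counts_py summary_quality_counts_py_alt
  simp only [List.foldl_map]
  rw [pv_sorted2_eq_sorted_lex, ← List.foldl_map (f := pvQuality)
      (g := fun (c : PySem.Dict String Int) q => c.insert q (c.getD q 0 + 1)),
    PySem.Dict.foldl_insert_getD_add_one_eq_counter]
  exact pv_main (ps.map pvQuality)
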